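-- pv_equiv track=rewrite | github.com/pikaplan/LearnExplaiNet | models/resnet/ResNet_Example.py | resnet_infer_module_stack
-- ===== SOURCE A (Python) =====
-- def resnet_infer_module_stack(layer_count):
--   # Infer the block count from layers of ResNet
--   nInferedBlockCount = None
--   for nModulesPerBlock in [2, 3, 4, 5, 6]:
--     for nBlockCount in [3, 4, 5]:
--       if (2 * nModulesPerBlock * nBlockCount) == layer_count - 2:
--         nInferedBlockCount = nBlockCount
--         break
--     if nInferedBlockCount is not None:
--       break
--   return nInferedBlockCount, nModulesPerBlock
-- ===== SOURCE B (Python) =====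
-- def resnet_infer_module_stack(layer_count):
--   # Single pass: solve 2*mpb*bc == layer_count-2 for bc arithmetically
--   # instead of scanning candidate block counts.
--   nInferedBlockCount = None
--   for nModulesPerBlock in [2, 3, 4, 5, 6]:
--     bc = (layer_count - 2) // (2 * nModulesPerBlock)
--     if bc in (3, 4, 5) and 2 * nModulesPerBlock * bc == layer_count - 2:
--       nInferedBlockCount = bc
--       break
--   return nInferedBlockCount, nModulesPerBlock
-- ===== Notes on version B (the rewrite author's own statement) =====
-- stated objective: simpler
-- what changed: The inner scan over candidate block counts [3,4,5] is replaced by solving the equation 2*mpb*bc == layer_count-2 with one floor division per modules-per-block value, leaving a single loop.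
import Mathlib
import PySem

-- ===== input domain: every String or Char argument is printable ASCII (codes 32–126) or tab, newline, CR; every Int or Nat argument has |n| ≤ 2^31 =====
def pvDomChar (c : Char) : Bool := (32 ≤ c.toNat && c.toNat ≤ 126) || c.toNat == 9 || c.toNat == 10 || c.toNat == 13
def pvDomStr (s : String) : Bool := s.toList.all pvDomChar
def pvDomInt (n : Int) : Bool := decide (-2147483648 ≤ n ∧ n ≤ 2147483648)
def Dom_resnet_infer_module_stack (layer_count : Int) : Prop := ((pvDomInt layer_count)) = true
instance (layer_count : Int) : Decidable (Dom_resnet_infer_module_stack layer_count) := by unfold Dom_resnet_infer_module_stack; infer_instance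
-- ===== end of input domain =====

-- B replaces the inner scan over [3,4,5] with one floor division per modules-per-block value (objective: simpler).


-- ===== PORT A =====
-- inner loop: scan nBlockCount in [3,4,5] for the first exact match
def pvAInner (layer_count nModulesPerBlock : Int) : List Int → Option Int
  | [] => none
  | bc :: rest =>
      if 2 * nModulesPerBlock * bc = layer_count - 2 then some bc
      else pvAInner layer_count nModulesPerBlock rest

-- outer loop: scan nModulesPerBlock in [2..6]; the second component is the
-- loop variable's final value (Python leaves it at 6 when no break fires)
def pvAOuter (layer_count : Int) : List Int → Int → Option Int × Int
  | [], mpb => (none, mpb)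
  | mpb :: rest, _ =>
      match pvAInner layer_count mpb [3, 4, 5] with
      | some bc => (some bc, mpb)
      | none => pvAOuter layer_count rest mpb

def resnet_infer_module_stack (layer_count : Int) : Option Int × Int :=
  pvAOuter layer_count [2, 3, 4, 5, 6] 0

-- ===== PORT B =====
-- single loop: solve 2*mpb*bc = layer_count-2 by floor division and verify
def pvBLoop (layer_count : Int) : List Int → Int → Option Int × Int
  | [], mpb => (none, mpb)
  | mpb :: rest, _ =>
      let bc := PySem.Int.floordiv (layer_count - 2) (2 * mpb)
      if (bc = 3 ∨ bc = 4 ∨ bc = 5) ∧ 2 * mpb * bc = layer_count - 2 then (some bc, mpb)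
      else pvBLoop layer_count rest mpb

def resnet_infer_module_stack_alt (layer_count : Int) : Option Int × Int :=
  pvBLoop layer_count [2, 3, 4, 5, 6] 0

-- ===== PRECONDITION & SPEC =====
def Spec_resnet_infer_module_stack (layer_count : Int) (out : Option Int × Int) : Prop := out = resnet_infer_module_stack_alt layer_count
instance (layer_count : Int) (out : Option Int × Int) : Decidable (Spec_resnet_infer_module_stack layer_count out) := by unfold Spec_resnet_infer_module_stack; infer_instance

-- ===== CLAIM (what is proved, stated in full; the proofs are below) =====
def Claim_equal_resnet_infer_module_stack : Prop := ∀ (layer_count : Int), Dom_resnet_infer_module_stack layer_count → Spec_resnet_infer_module_stack layer_count (resnet_infer_module_stack layer_count)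

-- ===== LEMMAS AND PROOFS =====

-- ===== VERDICT (by name: the statement is the Claim_ definition above) =====
-- the inner scan over [3,4,5] returns exactly the floor-division solution when it verifies
theorem pvInner_char (lc m : Int) (hm : m ≠ 0) :
    pvAInner lc m [3, 4, 5] =
      (if (PySem.Int.floordiv (lc - 2) (2 * m) = 3 ∨ PySem.Int.floordiv (lc - 2) (2 * m) = 4 ∨
            PySem.Int.floordiv (lc - 2) (2 * m) = 5) ∧
          2 * m * PySem.Int.floordiv (lc - 2) (2 * m) = lc - 2
        then some (PySem.Int.floordiv (lc - 2) (2 * m)) else none) := by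
  have h2m : (2 * m) ≠ 0 := by intro h; apply hm; omega
  have key : ∀ bc : Int, 2 * m * bc = lc - 2 → PySem.Int.floordiv (lc - 2) (2 * m) = bc := by
    intro bc h
    rw [PySem.Int.floordiv, ← h]
    exact Int.mul_fdiv_cancel_left _ h2m
  by_cases h3 : 2 * m * 3 = lc - 2
  · have hq := key 3 h3
    simp [pvAInner, h3, hq]
  · by_cases h4 : 2 * m * 4 = lc - 2
    · have hq := key 4 h4
      simp [pvAInner, h3, h4, hq]
    · by_cases h5 : 2 * m * 5 = lc - 2
      · have hq := key 5 h5
        simp [pvAInner, h3, h4, h5, hq]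
      · simp only [pvAInner, if_neg h3, if_neg h4, if_neg h5]
        rw [if_neg]
        rintro ⟨hset, heq⟩
        rcases hset with h | h | h <;> rw [h] at heq <;> [exact h3 heq; exact h4 heq; exact h5 heq]

-- matching on (if c then some q else none) is the corresponding if on pairs
theorem pvMatch_if (c : Prop) [Decidable c] (q m : Int) (k : Option Int × Int) :
    (match (if c then some q else none) with
      | some bc => (some bc, m)
      | none => k) = if c then (some q, m) else k := by
  split_ifs <;> rfl

theorem resnet_infer_module_stack_spec : Claim_equal_resnet_infer_module_stack := by
  intro lc _
  unfold Spec_resnet_infer_module_stack resnet_infer_module_stack resnet_infer_module_stack_alt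
  simp only [pvAOuter, pvBLoop,
    pvInner_char lc 2 (by norm_num), pvInner_char lc 3 (by norm_num),
    pvInner_char lc 4 (by norm_num), pvInner_char lc 5 (by norm_num),
    pvInner_char lc 6 (by norm_num), pvMatch_if]
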